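-- pv_equiv track=rewrite | github.com/Richie735/Advent-of-Code-2023 | Day-07/Day-07.py | get_joker_hand_type
-- ===== SOURCE A (Python) =====
-- from collections import defaultdict
--
-- def get_joker_hand_type(hand):
--     counts = defaultdict(int)
--     jokers = 0
--     for card in hand:
--         if card == "J": jokers += 1
--         else: counts[card] += 1
--
--     amount = sorted(counts.values())
--     if jokers >= 5 or amount[-1] + jokers >= 5: return 6 # Five of a kind
--     if jokers >= 4 or amount[-1] + jokers >= 4: return 5 # Four of a kind
--
--     if amount[-1] + jokers >= 3:
--         remaining_jokers = amount[-1] + jokers - 3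
--         if len(amount) >= 2 and amount[-2] + remaining_jokers >= 2 or remaining_jokers >= 2: return 4 # Full house
--         return 3 # Three of a kind
--
--     if amount[-1] + jokers >= 2:
--         remaining_jokers = amount[-1] + jokers - 2
--         if len(amount) >= 2 and amount[-2] + remaining_jokers >= 2 or remaining_jokers >= 2: return 2 # Two pairs
--         return 1 # One pair
--
--     return 0
-- ===== SOURCE B (Python) =====
-- def get_joker_hand_type(hand):
--     # B: no joker arithmetic — try each candidate replacement card for the
--     # jokers and take the best plain (joker-free) hand type.
--     def plain_type(cards):
--         counts = {}
--         for c in cards: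
--             counts[c] = counts.get(c, 0) + 1
--         vals = sorted(counts.values(), reverse=True)
--         a = vals[0] if vals else 0
--         b = vals[1] if len(vals) > 1 else 0
--         if a >= 5: return 6
--         if a >= 4: return 5
--         if a >= 3: return 4 if b >= 2 else 3
--         if a >= 2: return 2 if b >= 2 else 1
--         return 0
--     candidates = [c for c in dict.fromkeys(hand) if c != "J"] or ["A"]
--     return max(plain_type([c if x == "J" else x for x in hand]) for c in candidates)
-- ===== Notes on version B (the rewrite author's own statement) =====
-- stated objective: alternative
-- what changed: B drops A's joker-threshold arithmetic entirely: it tries each distinct non-joker card as a replacement for all the jokers, classifies each substituted hand with a plain joker-free classifier, and returns the maximum - a substitute-and-maximise algorithm instead of A's cascade over joker-adjusted counts.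
-- outside the precondition, e.g. on get_joker_hand_type(''): A raises IndexError, B returns 0; on get_joker_hand_type('JJJJ'): A raises IndexError, B returns 5
-- crash fix: On hands consisting only of 'J' with fewer than five of them (including the empty hand) A raises IndexError on amount[-1]; B returns the hand type of the joker group itself (e.g. 0 for '', 5 for 'JJJJ'). — e.g. on get_joker_hand_type(""): A raises IndexError, B returns 0
import Mathlib
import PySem

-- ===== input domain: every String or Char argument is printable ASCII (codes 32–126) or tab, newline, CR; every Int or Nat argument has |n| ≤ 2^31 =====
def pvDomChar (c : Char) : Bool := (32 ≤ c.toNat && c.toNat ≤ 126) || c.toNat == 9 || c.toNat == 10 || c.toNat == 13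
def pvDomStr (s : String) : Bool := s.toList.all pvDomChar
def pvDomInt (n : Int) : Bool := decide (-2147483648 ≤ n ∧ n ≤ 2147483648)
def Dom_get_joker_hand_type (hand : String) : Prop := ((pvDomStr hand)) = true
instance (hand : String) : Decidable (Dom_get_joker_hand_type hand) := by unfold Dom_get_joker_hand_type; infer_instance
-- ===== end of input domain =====

-- B removes A's joker arithmetic (and its always-zero remaining_jokers terms) entirely: it tries
-- each distinct non-joker card of the hand as a replacement for all jokers and returns the best
-- plain (joker-free) hand type — a substitution-and-maximise algorithm instead of A's threshold
-- cascade over joker-adjusted counts (objective: alternative). Pre_ excludes exactly the hands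
-- made only of 'J' with fewer than five of them, on which A raises IndexError; B returns a value
-- there (see Raises_).


-- ===== PORT A =====
def get_joker_hand_type (hand : String) : Int :=
  let st := hand.toList.foldl
    (fun (p : PySem.Dict Char Int × Int) card =>
      if card = 'J' then (p.1, p.2 + 1) else (p.1.modify card 0 (· + 1), p.2))
    (PySem.Dict.empty, 0)
  let amount := PySem.List.sorted st.1.values (fun x => x) false
  if st.2 ≥ 5 then 6
  else
    match PySem.List.pyGet? amount (-1) with
    | none => 0  -- Python raises IndexError here (amount[-1] on []); excluded by Pre_
    | some top =>
      if top + st.2 ≥ 5 then 6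
      else if st.2 ≥ 4 ∨ top + st.2 ≥ 4 then 5
      else if top + st.2 ≥ 3 then
        (let r := top + st.2 - 3
         if (amount.length ≥ 2 ∧ PySem.List.pyGetD amount (-2) 0 + r ≥ 2) ∨ r ≥ 2 then 4 else 3)
      else if top + st.2 ≥ 2 then
        (let r := top + st.2 - 2
         if (amount.length ≥ 2 ∧ PySem.List.pyGetD amount (-2) 0 + r ≥ 2) ∨ r ≥ 2 then 2 else 1)
      else 0

-- ===== PORT B =====
-- B-side helper: plain (joker-free) hand classification of a card list.
def pvPlainType (cards : List Char) : Int :=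
  let counts := cards.foldl (fun (d : PySem.Dict Char Int) c => d.insert c (d.getD c 0 + 1)) PySem.Dict.empty
  let vals := PySem.List.sorted counts.values (fun x => x) true
  let a := vals.headD 0
  let b := if 1 < vals.length then vals.getD 1 0 else 0
  if a ≥ 5 then 6
  else if a ≥ 4 then 5
  else if a ≥ 3 then (if b ≥ 2 then 4 else 3)
  else if a ≥ 2 then (if b ≥ 2 then 2 else 1)
  else 0

def get_joker_hand_type_alt (hand : String) : Int :=
  let cand0 := (PySem.List.dedup hand.toList).filter (fun c => c ≠ 'J')
  let candidates := if cand0 = [] then ['A'] else cand0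
  let scores := candidates.map (fun c =>
    pvPlainType (hand.toList.map (fun x => if x = 'J' then c else x)))
  (PySem.List.max? scores (fun x => x)).getD 0  -- candidates is never empty, so max? is never none

-- ===== PRECONDITION & SPEC =====
-- Pre_ excludes exactly the inputs on which A raises IndexError: hands with no non-'J' card and fewer than five 'J's.
def Pre_get_joker_hand_type (hand : String) : Prop :=
  5 ≤ hand.toList.count 'J' ∨ hand.toList.any (fun c => c ≠ 'J') = true
instance (hand : String) : Decidable (Pre_get_joker_hand_type hand) := by
  unfold Pre_get_joker_hand_type; infer_instance
def pvWitness_get_joker_hand_type : String := "A23JJ"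

-- A raises IndexError on hands consisting only of 'J' with fewer than five of them; B returns the hand type of the joker group itself.
def Raises_get_joker_hand_type (hand : String) : Prop :=
  hand.toList.count 'J' < 5 ∧ hand.toList.all (fun c => c == 'J') = true
instance (hand : String) : Decidable (Raises_get_joker_hand_type hand) := by
  unfold Raises_get_joker_hand_type; infer_instance
def pvRaiseWitness_get_joker_hand_type : String := ""
def pvRaiseWitnessOut_get_joker_hand_type : Int := 0

def Spec_get_joker_hand_type (hand : String) (out : Int) : Prop := out = get_joker_hand_type_alt hand
instance (hand : String) (out : Int) : Decidable (Spec_get_joker_hand_type hand out) := by unfold Spec_get_joker_hand_type; infer_instance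

-- ===== CLAIM (what is proved, stated in full; the proofs are below) =====
def Claim_equal_get_joker_hand_type : Prop := ∀ (hand : String), Dom_get_joker_hand_type hand → Pre_get_joker_hand_type hand → Spec_get_joker_hand_type hand (get_joker_hand_type hand)
def Claim_raises_get_joker_hand_type : Prop := (∀ (hand : String), Dom_get_joker_hand_type hand → Raises_get_joker_hand_type hand → ¬ Pre_get_joker_hand_type hand) ∧ (Dom_get_joker_hand_type (pvRaiseWitness_get_joker_hand_type) ∧ Raises_get_joker_hand_type (pvRaiseWitness_get_joker_hand_type) ∧ get_joker_hand_type_alt (pvRaiseWitness_get_joker_hand_type) = pvRaiseWitnessOut_get_joker_hand_type)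

-- ===== LEMMAS AND PROOFS =====

-- The common classification table both proofs reduce to.
def pt2 (a b : Int) : Int :=
  if a ≥ 5 then 6
  else if a ≥ 4 then 5
  else if a ≥ 3 then (if b ≥ 2 then 4 else 3)
  else if a ≥ 2 then (if b ≥ 2 then 2 else 1)
  else 0

def sortD (v : List Int) : List Int := PySem.List.sorted v (fun x => x) true

def scoreOf (v : List Int) (j : Int) : Int :=
  pt2 (v.headD 0 + j) (if 1 < v.length then v.getD 1 0 else 0)

-- The value both programs compute: classify the non-joker counts with all jokers on the top group.
def pvSpecVal (hand : String) : Int :=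
  scoreOf (sortD (PySem.Dict.counter (hand.toList.filter (fun c => c ≠ 'J'))).values)
          (hand.toList.count 'J')

theorem pvplain_eq (cards : List Char) :
    pvPlainType cards = scoreOf (sortD (PySem.Dict.counter cards).values) 0 := by
  simp [pvPlainType, scoreOf, sortD, pt2,
    PySem.Dict.foldl_insert_getD_add_one_eq_counter]

-- A's counting loop, characterised.
theorem foldA_eq (l : List Char) (d : PySem.Dict Char Int) (j : Int) :
    l.foldl (fun (p : PySem.Dict Char Int × Int) card =>
      if card = 'J' then (p.1, p.2 + 1) else (p.1.modify card 0 (· + 1), p.2)) (d, j)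
    = ((l.filter (fun card => card ≠ 'J')).foldl (fun d c => d.modify c 0 (· + 1)) d,
       j + (l.count 'J' : Int)) := by
  induction l generalizing d j with
  | nil => simp
  | cons c t ih =>
    by_cases hc : c = 'J'
    · simp [hc, ih]; ring
    · simp [hc, ih]

-- For an identity key on Int, Python's sorted(…, reverse=True) is the reverse of sorted(…).
theorem sorted_rev_eq_reverse (v : List Int) :
    PySem.List.sorted v (fun x => x) true = (PySem.List.sorted v (fun x => x) false).reverse := by
  have h1 := PySem.List.sorted_perm v (fun x : Int => x) true
  have h2 := PySem.List.sorted_perm v (fun x : Int => x) false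
  have hp : (PySem.List.sorted v (fun x => x) true).Perm
      ((PySem.List.sorted v (fun x => x) false).reverse) :=
    h1.trans (h2.symm.trans (List.reverse_perm _).symm)
  have hs1 : (PySem.List.sorted v (fun x => x) true).Pairwise (fun a b : Int => b ≤ a) := by
    simpa using PySem.List.sorted_pairwise_rev v (fun x => x)
  have hs2 : ((PySem.List.sorted v (fun x => x) false).reverse).Pairwise (fun a b : Int => b ≤ a) := by
    rw [List.pairwise_reverse]
    simpa using PySem.List.sorted_pairwise v (fun x => x)
  exact List.Perm.eq_of_pairwise (fun a b _ _ hab hba => le_antisymm hba hab) hs1 hs2 hp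

theorem sortD_congr {xs ys : List Int} (h : xs.Perm ys) : sortD xs = sortD ys := by
  unfold sortD
  rw [sorted_rev_eq_reverse, sorted_rev_eq_reverse,
    PySem.List.sorted_eq_sorted_of_perm xs ys (fun x => x) (fun a b h => h) h]

theorem sortD_perm (v : List Int) : (sortD v).Perm v := PySem.List.sorted_perm v _ _

theorem sortD_pairwise (v : List Int) : (sortD v).Pairwise (fun a b : Int => b ≤ a) := by
  simpa using PySem.List.sorted_pairwise_rev v (fun x : Int => x)

theorem sortD_eq_self {v : List Int} (h : v.Pairwise (fun a b : Int => b ≤ a)) : sortD v = v := by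
  unfold sortD
  exact PySem.List.sorted_rev_eq_self_of_pairwise v _ (by simpa using h)

-- values of a counter, as counts over its key set
theorem counter_values_eq (f : List Char) :
    (PySem.Dict.counter f : PySem.Dict Char Int).values
      = (PySem.Set.ofList f : List Char).map (fun k => (f.count k : Int)) := by
  rw [PySem.Dict.values_eq_map_keys _ (PySem.Dict.nodup_keys_counter f) 0,
    PySem.Dict.keys_counter]
  exact List.map_congr_left (fun k _ => PySem.Dict.getD_counter f k)

theorem counter_values_nil (f : List Char) :
    (PySem.Dict.counter f : PySem.Dict Char Int).values = [] ↔ f = [] := by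
  rw [counter_values_eq, List.map_eq_nil_iff]
  constructor
  · intro h
    by_contra hf
    obtain ⟨c, hc⟩ := List.exists_mem_of_ne_nil f hf
    have : c ∈ (PySem.Set.ofList f : List Char) := (PySem.Set.mem_ofList _ _).mpr hc
    rw [h] at this; simp at this
  · intro h; subst h; rfl

-- counts in the joker-substituted list
theorem count_map_subst (l : List Char) (c k : Char) :
    (l.map (fun x => if x = 'J' then c else x)).count k
    = (l.filter (fun x => x ≠ 'J')).count k + (if k = c then l.count 'J' else 0) := by
  induction l with
  | nil => simp
  | cons a t ih =>
    by_cases ha : a = 'J'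
    · subst ha
      rw [List.map_cons, if_pos rfl, List.count_cons, ih,
        List.filter_cons_of_neg (by simp)]
      by_cases hkc : k = c
      · subst hkc; simp; omega
      · simp [hkc, Ne.symm hkc]
    · rw [List.map_cons, if_neg ha, List.count_cons, ih,
        List.filter_cons_of_pos (by simp [ha]), List.count_cons]
      by_cases hkc : k = c
      · subst hkc; simp [ha]; omega
      · simp [hkc]

-- membership in the joker-substituted list
theorem mem_map_subst (l : List Char) (c k : Char) (hc : c ∈ l.filter (fun x => x ≠ 'J')) :
    k ∈ l.map (fun x => if x = 'J' then c else x) ↔ k ∈ l.filter (fun x => x ≠ 'J') := by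
  rw [List.mem_filter] at hc
  obtain ⟨hcl, hcJ⟩ := hc
  simp only [List.mem_map, List.mem_filter]
  constructor
  · rintro ⟨x, hx, hfx⟩
    by_cases hxJ : x = 'J'
    · subst hxJ; simp at hfx; subst hfx; exact ⟨hcl, hcJ⟩
    · simp [hxJ] at hfx; subst hfx; exact ⟨hx, by simpa using hxJ⟩
  · rintro ⟨hkl, hkJ⟩
    refine ⟨k, hkl, ?_⟩
    simp at hkJ
    simp [hkJ]

-- bumping one key of a nodup key list, as a permutation on the value list
theorem map_bump_perm {α : Type} [DecidableEq α] (F : α → Int) (j : Int) (c : α) :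
    ∀ (ks : List α), ks.Nodup → c ∈ ks →
    (ks.map (fun k => F k + if k = c then j else 0)).Perm ((F c + j) :: ((ks.map F).erase (F c))) := by
  intro ks
  induction ks with
  | nil => intro _ h; simp at h
  | cons a t ih =>
    intro hnd hc
    rcases List.mem_cons.mp hc with rfl | hct
    · have hat : ∀ k ∈ t, k ≠ c := fun k hk => fun he => (List.nodup_cons.mp hnd).1 (he ▸ hk)
      have hmt : t.map (fun k => F k + if k = c then j else 0) = t.map F :=
        List.map_congr_left (fun k hk => by simp [hat k hk])
      simp [hmt, List.erase_cons_head]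
    · have hac : a ≠ c := fun he => (List.nodup_cons.mp hnd).1 (he ▸ hct)
      have ihp := ih (List.nodup_cons.mp hnd).2 hct
      have hFc : F c ∈ t.map F := List.mem_map_of_mem hct
      have step1 : ((a :: t).map (fun k => F k + if k = c then j else 0))
          = F a :: t.map (fun k => F k + if k = c then j else 0) := by simp [hac]
      have step3 : (F a :: ((F c + j) :: ((t.map F).erase (F c)))).Perm
          ((F c + j) :: (F a :: ((t.map F).erase (F c)))) := List.Perm.swap _ _ _
      have step4 : (F a :: ((t.map F).erase (F c))).Perm (((a :: t).map F).erase (F c)) := by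
        by_cases hFa : F a = F c
        · rw [List.map_cons, hFa, List.erase_cons_head]
          exact (List.perm_cons_erase hFc).symm
        · rw [List.map_cons, List.erase_cons_tail (by simpa using hFa)]
      rw [step1]
      exact ((ihp.cons (F a)).trans step3).trans (step4.cons _)

theorem pt2_mono_lt {a b A B : Int} (h : a < A) : pt2 a b ≤ pt2 A B := by
  unfold pt2; split_ifs <;> omega

theorem counter_values_pos (f : List Char) :
    ∀ x ∈ (PySem.Dict.counter f : PySem.Dict Char Int).values, (1 : Int) ≤ x := by
  intro x hx
  rw [counter_values_eq] at hx
  obtain ⟨k, hk, rfl⟩ := List.mem_map.mp hx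
  rw [PySem.Set.mem_ofList] at hk
  exact_mod_cast List.one_le_count_iff.mpr hk

-- A = pvSpecVal on Pre_
set_option maxHeartbeats 1000000 in
theorem A_eq (hand : String) (hpre : Pre_get_joker_hand_type hand) :
    get_joker_hand_type hand = pvSpecVal hand := by
  unfold get_joker_hand_type pvSpecVal scoreOf pt2 sortD
  rw [foldA_eq, ← PySem.Dict.counter_eq_foldl]
  dsimp only
  simp only [zero_add]
  set l := hand.toList with hl
  set f := l.filter (fun card => card ≠ 'J') with hf
  set j : Int := (l.count 'J' : Int) with hj
  set v := (PySem.Dict.counter f : PySem.Dict Char Int).values with hv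
  rw [sorted_rev_eq_reverse]
  set asc := PySem.List.sorted v (fun x => x) false with hasc
  have hjnn : (0:Int) ≤ j := by rw [hj]; positivity
  by_cases hvnil : v = []
  · have hfnil : f = [] := (counter_values_nil f).mp (hv ▸ hvnil)
    have hcnt : 5 ≤ l.count 'J' := by
      rcases hpre with h | hany
      · exact h
      · exfalso
        obtain ⟨c, hc, hne⟩ := List.any_eq_true.mp hany
        have hcf : c ∈ f := by
          rw [hf, List.mem_filter]; exact ⟨hc, hne⟩
        rw [hfnil] at hcf; simp at hcf
    have hj5 : (5:Int) ≤ j := by rw [hj]; omega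
    have hascnil : asc = [] := by
      rw [hasc, PySem.List.sorted_eq_nil_iff]; exact hvnil
    rw [hascnil, show PySem.List.pyGet? ([]: List Int) (-1) = none from rfl]
    simp only [List.reverse_nil, List.headD_nil, List.length_nil]
    split_ifs <;> omega
  · have hascne : asc ≠ [] := by
      rw [hasc, Ne, PySem.List.sorted_eq_nil_iff]; exact hvnil
    set t := asc.reverse with ht
    have hasct : asc = t.reverse := by rw [ht, List.reverse_reverse]
    rw [hasct]
    have htne : t ≠ [] := by
      rw [ht]; simpa using hascne
    obtain ⟨t0, rest, htc⟩ := List.exists_cons_of_ne_nil htne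
    have hhead : PySem.List.pyGet? t.reverse (-1) = some t0 := by
      rw [PySem.List.pyGet?_neg_one, List.getLast?_reverse, htc]; rfl
    rw [hhead]
    have ht0 : (1:Int) ≤ t0 := by
      have : t0 ∈ v := by
        rw [← PySem.List.mem_sorted (key := fun x : Int => x) (rev := false), ← hasc, hasct]
        simp [htc]
      exact counter_values_pos f t0 (hv ▸ this)
    clear_value t asc v j f l
    by_cases h2 : 2 ≤ t.length
    · have hgd : PySem.List.pyGetD t.reverse (-2) 0 = t.getD 1 0 := by
        rw [PySem.List.pyGetD_neg_ofNat t.reverse 2 0 (by omega) (by simpa using h2)]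
        rw [List.getElem_reverse]
        rw [List.getD_eq_getElem _ _ (by omega)]
        congr 1
        simp
        omega
      rw [hgd]
      simp only [List.length_reverse, htc, List.headD_cons]
      split_ifs <;> omega
    · have hrest : rest = [] := by
        have h2' : ¬ (2 ≤ (t0 :: rest).length) := htc ▸ h2
        simp at h2'
        simpa using h2'
      subst hrest
      subst htc
      simp only [List.reverse_cons, List.reverse_nil, List.nil_append, List.length_cons,
        List.length_nil, List.headD_cons]
      norm_num
      split_ifs <;> omega

theorem values_subst_perm (l : List Char) (c : Char) (hc : c ∈ l.filter (fun x => x ≠ 'J')) :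
    (PySem.Dict.counter (l.map (fun x => if x = 'J' then c else x)) : PySem.Dict Char Int).values.Perm
      ((((l.filter (fun x => x ≠ 'J')).count c : Int) + (l.count 'J' : Int)) ::
        ((PySem.Dict.counter (l.filter (fun x => x ≠ 'J')) : PySem.Dict Char Int).values.erase
          ((l.filter (fun x => x ≠ 'J')).count c : Int))) := by
  set f := l.filter (fun x => x ≠ 'J') with hf
  have hkeys : (PySem.Set.ofList (l.map (fun x => if x = 'J' then c else x)) : List Char).Perm
      (PySem.Set.ofList f) :=
    (List.perm_ext_iff_of_nodup (PySem.Set.nodup_ofList _) (PySem.Set.nodup_ofList _)).mpr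
      (fun k => by
        rw [PySem.Set.mem_ofList, PySem.Set.mem_ofList]
        exact mem_map_subst l c k hc)
  rw [counter_values_eq, counter_values_eq]
  have hmap₁ := hkeys.map (fun k => (((l.map (fun x => if x = 'J' then c else x)).count k : Nat) : Int))
  have hfun : (PySem.Set.ofList f : List Char).map (fun k => (((l.map (fun x => if x = 'J' then c else x)).count k : Nat) : Int))
      = (PySem.Set.ofList f : List Char).map (fun k => ((f.count k : Nat) : Int) + if k = c then ((l.count 'J' : Nat) : Int) else 0) :=
    List.map_congr_left (fun k _ => by
      rw [count_map_subst l c]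
      push_cast [apply_ite (Nat.cast : Nat → Int)]
      simp [hf])
  have hcof : c ∈ (PySem.Set.ofList f : List Char) := (PySem.Set.mem_ofList _ _).mpr hc
  have hbump := map_bump_perm (fun k => ((f.count k : Nat) : Int)) ((l.count 'J' : Nat) : Int) c
      (PySem.Set.ofList f) (PySem.Set.nodup_ofList _) hcof
  exact (hmap₁.trans (hfun ▸ hbump))

-- score of a candidate, as a function of the sorted non-joker counts
theorem candidate_score (l : List Char) (c : Char) (hc : c ∈ l.filter (fun x => x ≠ 'J')) :
    pvPlainType (l.map (fun x => if x = 'J' then c else x))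
    = scoreOf (sortD ((((l.filter (fun x => x ≠ 'J')).count c : Int) + (l.count 'J' : Int)) ::
        ((sortD (PySem.Dict.counter (l.filter (fun x => x ≠ 'J')) : PySem.Dict Char Int).values).erase
          ((l.filter (fun x => x ≠ 'J')).count c : Int)))) 0 := by
  rw [pvplain_eq]
  congr 1
  refine sortD_congr ((values_subst_perm l c hc).trans (List.Perm.cons _ ?_))
  exact ((sortD_perm _).symm).erase _

theorem scoreOf_bump_top (t0 : Int) (rest : List Int) (j : Int) (hj : 0 ≤ j)
    (hpw : (t0 :: rest).Pairwise (fun a b : Int => b ≤ a)) :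
    scoreOf (sortD ((t0 + j) :: ((t0 :: rest).erase t0))) 0 = scoreOf (t0 :: rest) j := by
  rw [List.erase_cons_head]
  have hpw' : ((t0 + j) :: rest).Pairwise (fun a b : Int => b ≤ a) := by
    rcases List.pairwise_cons.mp hpw with ⟨hall, htail⟩
    exact List.pairwise_cons.mpr ⟨fun b hb => le_trans (hall b hb) (by omega), htail⟩
  rw [sortD_eq_self hpw']
  unfold scoreOf
  simp

theorem scoreOf_bump_le (v : List Int) (t0 : Int) (rest : List Int) (hv : v = t0 :: rest)
    (hpw : v.Pairwise (fun a b : Int => b ≤ a)) (j wc : Int) (hj : 0 ≤ j)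
    (hwc : wc ∈ v) :
    scoreOf (sortD ((wc + j) :: v.erase wc)) 0 ≤ scoreOf v j := by
  by_cases hj0 : j = 0
  · subst hj0
    have hperm : ((wc + 0) :: v.erase wc).Perm v := by
      rw [add_zero]; exact (List.perm_cons_erase hwc).symm
    rw [sortD_congr hperm, sortD_eq_self hpw]
  · by_cases hwt : wc = t0
    · rw [hwt, hv, scoreOf_bump_top t0 rest j hj (hv ▸ hpw)]
    · have hwle : wc ≤ t0 := by
        rw [hv] at hwc
        rcases List.mem_cons.mp hwc with rfl | hm
        · rfl
        · exact (List.pairwise_cons.mp (hv ▸ hpw)).1 wc hm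
      set s := sortD ((wc + j) :: v.erase wc) with hs
      have hsne : s ≠ [] := by
        rw [hs]; unfold sortD; rw [Ne, PySem.List.sorted_eq_nil_iff]; simp
      obtain ⟨a, tl, hstl⟩ := List.exists_cons_of_ne_nil hsne
      have hmem : a ∈ (wc + j) :: v.erase wc := by
        have ha : a ∈ s := hstl ▸ List.mem_cons_self
        rw [hs] at ha
        unfold sortD at ha
        exact (PySem.List.mem_sorted _ _ _ _).mp ha
      have halt : a < t0 + j := by
        rcases List.mem_cons.mp hmem with rfl | hmem'
        · omega
        · have hav : a ∈ v := List.mem_of_mem_erase hmem'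
          have : a ≤ t0 := by
            rw [hv] at hav
            rcases List.mem_cons.mp hav with rfl | hm
            · rfl
            · exact (List.pairwise_cons.mp (hv ▸ hpw)).1 a hm
          omega
      rw [hstl, hv]
      unfold scoreOf
      simp only [List.headD_cons, add_zero]
      exact pt2_mono_lt (by omega)

theorem ofList_all_eq (xs : List Char) (a : Char) (hne : xs ≠ []) (hall : ∀ y ∈ xs, y = a) :
    (PySem.Set.ofList xs : List Char) = [a] := by
  induction xs with
  | nil => simp at hne
  | cons x t ih =>
    have hx : x = a := hall x List.mem_cons_self
    subst hx
    rw [PySem.Set.ofList_cons]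
    by_cases ht : t = []
    · subst ht; rfl
    · rw [ih ht (fun y hy => hall y (List.mem_cons_of_mem _ hy))]
      congr 1
      apply List.eq_nil_iff_forall_not_mem.mpr
      intro y hy
      rw [PySem.Set.mem_discard] at hy
      exact hy.2 (by simpa using hy.1)

-- B = pvSpecVal on Pre_
set_option maxHeartbeats 1000000 in
theorem B_eq (hand : String) (hpre : Pre_get_joker_hand_type hand) :
    get_joker_hand_type_alt hand = pvSpecVal hand := by
  unfold get_joker_hand_type_alt
  dsimp only
  set l := hand.toList with hl
  set f := l.filter (fun c => c ≠ 'J') with hf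
  by_cases hfnil : f = []
  · -- all-joker hand: the single candidate 'A' scores the joker group itself
    have hallJ : ∀ x ∈ l, x = 'J' := by
      intro x hx
      by_contra hxne
      have : x ∈ f := by rw [hf, List.mem_filter]; exact ⟨hx, by simpa using hxne⟩
      rw [hfnil] at this; simp at this
    have hcnt5 : 5 ≤ l.count 'J' := by
      rcases hpre with h | hany
      · exact h
      · exfalso
        obtain ⟨c, hc, hne⟩ := List.any_eq_true.mp hany
        have hcJ := hallJ c hc
        simp [hcJ] at hne
    have hlne : l ≠ [] := by intro h; rw [h] at hcnt5; simp at hcnt5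
    have hcand : (PySem.List.dedup l).filter (fun c => c ≠ 'J') = [] := by
      apply List.filter_eq_nil_iff.mpr
      intro x hx
      simp [hallJ x ((PySem.List.mem_dedup l x).mp hx)]
    rw [hcand, if_pos rfl]
    rw [List.map_cons, List.map_nil, PySem.List.max?_id_cons]
    simp only [List.foldl_nil, Option.getD_some]
    rw [pvplain_eq]
    -- substituted list is all 'A'
    set lr := l.map (fun x => if x = 'J' then 'A' else x) with hlr
    have hallA : ∀ y ∈ lr, y = 'A' := by
      intro y hy
      rw [hlr] at hy
      obtain ⟨x, hx, hfx⟩ := List.mem_map.mp hy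
      rw [hallJ x hx, if_pos rfl] at hfx
      exact hfx.symm
    have hlrne : lr ≠ [] := by
      rw [hlr]; simpa using hlne
    have hvals : (PySem.Dict.counter lr : PySem.Dict Char Int).values = [(lr.count 'A' : Int)] := by
      rw [counter_values_eq, ofList_all_eq lr 'A' hlrne hallA, List.map_cons, List.map_nil]
    have hcnt : lr.count 'A' = l.count 'J' := by
      have h1 : lr.count 'A' = lr.length := List.count_eq_length.mpr (fun b hb => (hallA b hb).symm)
      have h2 : l.count 'J' = l.length := List.count_eq_length.mpr (fun b hb => (hallJ b hb).symm)
      rw [h1, h2, hlr, List.length_map]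
    have hcountf : (PySem.Dict.counter f : PySem.Dict Char Int).values = [] := by
      rw [hfnil]; rfl
    rw [hvals, hcnt]
    unfold pvSpecVal
    rw [← hl, ← hf, hcountf]
    have hs1 : sortD [(l.count 'J' : Int)] = [(l.count 'J' : Int)] :=
      sortD_eq_self (List.pairwise_singleton _ _)
    have hs2 : sortD ([] : List Int) = [] := rfl
    rw [hs1, hs2]
    unfold scoreOf pt2
    simp only [List.headD_cons, List.headD_nil, List.length_cons, List.length_nil, List.getD]
    have : (5:Int) ≤ (l.count 'J' : Int) := by exact_mod_cast hcnt5
    split_ifs <;> omega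
  · -- some non-joker card exists
    have hvne : (PySem.Dict.counter f : PySem.Dict Char Int).values ≠ [] := by
      rw [Ne, counter_values_nil]; exact hfnil
    set v := sortD (PySem.Dict.counter f : PySem.Dict Char Int).values with hv
    have hvne' : v ≠ [] := by
      rw [hv]; unfold sortD; rw [Ne, PySem.List.sorted_eq_nil_iff]; exact hvne
    obtain ⟨t0, rest, hvtc⟩ := List.exists_cons_of_ne_nil hvne'
    have hpw : v.Pairwise (fun a b : Int => b ≤ a) := hv ▸ sortD_pairwise _
    set j : Int := (l.count 'J' : Int) with hj
    have hjnn : (0:Int) ≤ j := by rw [hj]; positivity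
    set cand0 := (PySem.List.dedup l).filter (fun c => c ≠ 'J') with hcand0
    have hcmem : ∀ k, k ∈ cand0 ↔ k ∈ f := by
      intro k
      rw [hcand0, hf, List.mem_filter, List.mem_filter, PySem.List.mem_dedup]
    -- a key attaining the top count
    have ht0v : t0 ∈ (PySem.Dict.counter f : PySem.Dict Char Int).values := by
      have : t0 ∈ v := hvtc ▸ List.mem_cons_self
      rw [hv] at this; unfold sortD at this
      exact (PySem.List.mem_sorted _ _ _ _).mp this
    obtain ⟨k0, hk0f, hk0⟩ : ∃ k0, k0 ∈ f ∧ (f.count k0 : Int) = t0 := by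
      rw [counter_values_eq] at ht0v
      obtain ⟨k, hk, he⟩ := List.mem_map.mp ht0v
      exact ⟨k, (PySem.Set.mem_ofList _ _).mp hk, he⟩
    have hk0c : k0 ∈ cand0 := (hcmem k0).mpr hk0f
    have hcne : cand0 ≠ [] := List.ne_nil_of_mem hk0c
    rw [if_neg hcne]
    -- the value everything is compared to
    have hSdef : pvSpecVal hand = scoreOf v j := by
      unfold pvSpecVal
      rw [← hl, ← hf, ← hv, ← hj]
    rw [hSdef]
    -- counts of candidates are values, hence members of v
    have hwmem : ∀ c ∈ cand0, ((f.count c : Nat) : Int) ∈ v := by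
      intro c hc
      have : ((f.count c : Nat) : Int) ∈ (PySem.Dict.counter f : PySem.Dict Char Int).values := by
        rw [counter_values_eq]
        exact List.mem_map_of_mem ((PySem.Set.mem_ofList _ _).mpr ((hcmem c).mp hc))
      rw [hv]; unfold sortD
      exact (PySem.List.mem_sorted _ _ _ _).mpr this
    -- upper bound for every score
    have hub : ∀ y ∈ cand0.map (fun c => pvPlainType (l.map (fun x => if x = 'J' then c else x))),
        y ≤ scoreOf v j := by
      intro y hy
      obtain ⟨c, hc, rfl⟩ := List.mem_map.mp hy
      rw [candidate_score l c ((hcmem c).mp hc), ← hf, ← hv, ← hj]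
      exact scoreOf_bump_le v t0 rest hvtc hpw j _ hjnn (hwmem c hc)
    -- the top key attains it
    have hattain : pvPlainType (l.map (fun x => if x = 'J' then k0 else x)) = scoreOf v j := by
      rw [candidate_score l k0 hk0f, ← hf, ← hv, ← hj, hk0, hvtc]
      exact scoreOf_bump_top t0 rest j hjnn (hvtc ▸ hpw)
    have hSmem : scoreOf v j ∈ cand0.map (fun c => pvPlainType (l.map (fun x => if x = 'J' then c else x))) := by
      rw [← hattain]
      exact List.mem_map_of_mem hk0c
    -- Python's max picks exactly that value
    obtain ⟨m, hm⟩ : ∃ m, PySem.List.max?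
        (cand0.map (fun c => pvPlainType (l.map (fun x => if x = 'J' then c else x)))) (fun x => x) = some m := by
      cases hmx : PySem.List.max?
          (cand0.map (fun c => pvPlainType (l.map (fun x => if x = 'J' then c else x)))) (fun x => x) with
      | none =>
        rw [PySem.List.max?_eq_none_iff] at hmx
        exact absurd (hmx ▸ hSmem) (by simp)
      | some m => exact ⟨m, rfl⟩
    rw [hm, Option.getD_some]
    have h1 : m ≤ scoreOf v j := hub m (PySem.List.max?_mem hm)
    have h2 : scoreOf v j ≤ m := PySem.List.max?_isMax hm _ hSmem
    omega

-- ===== VERDICT (by name: the statement is the Claim_ definition above) =====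
theorem get_joker_hand_type_spec : Claim_equal_get_joker_hand_type := by
  intro hand _ hpre
  unfold Spec_get_joker_hand_type
  rw [A_eq hand hpre, B_eq hand hpre]

theorem get_joker_hand_type_raises : Claim_raises_get_joker_hand_type := by
  unfold Claim_raises_get_joker_hand_type
  refine ⟨?_, by decide⟩
  intro hand _ hr hpre
  obtain ⟨hlt, hall⟩ := hr
  rcases hpre with h5 | hany
  · omega
  · obtain ⟨c, hc, hne⟩ := List.any_eq_true.mp hany
    have hcj := List.all_eq_true.mp hall c hc
    simp at hne hcj
    exact hne hcj

-- self-check: on the raise witness (where A raises IndexError) B's port indeed returns the stated value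
theorem pv_raise_witness_ok : get_joker_hand_type_alt "" = 0 :=
  get_joker_hand_type_raises.2.2.2
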